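-- pv_equiv track=rewrite | github.com/JuliusMaliwat/msc-thesis | src/tracking_framework/tracking/sort_bev/sort_bev.py | _detections_to_frame_dict
-- ===== SOURCE A (Python) =====
-- def _detections_to_frame_dict(detections):
--     """
--     Organize detections into a dictionary by frame.
--
--     Args:
--         detections (list): List of detections [[frame_id, x, y], ...]
--
--     Returns:
--         dict: Mapping from frame_id to list of detections
--     """
--     frame_dict = {}
--     for det in detections:
--         frame_id = det[0]
--         if frame_id not in frame_dict:
--             frame_dict[frame_id] = []
--         frame_dict[frame_id].append(det[1:])
--     return frame_dict
-- ===== SOURCE B (Python) =====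
-- def _detections_to_frame_dict(detections):
--     # Two-pass: distinct frame_ids in first-appearance order, then one scan per id.
--     ids = list(dict.fromkeys(det[0] for det in detections))
--     return {fid: [det[1:] for det in detections if det[0] == fid] for fid in ids}
-- ===== Notes on version B (the rewrite author's own statement) =====
-- stated objective: alternative
-- what changed: Replaces the single accumulating dict pass with two phases: compute the distinct frame_ids in first-appearance order, then build the dict by a comprehension that scans the detections once per id.
import Mathlib
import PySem

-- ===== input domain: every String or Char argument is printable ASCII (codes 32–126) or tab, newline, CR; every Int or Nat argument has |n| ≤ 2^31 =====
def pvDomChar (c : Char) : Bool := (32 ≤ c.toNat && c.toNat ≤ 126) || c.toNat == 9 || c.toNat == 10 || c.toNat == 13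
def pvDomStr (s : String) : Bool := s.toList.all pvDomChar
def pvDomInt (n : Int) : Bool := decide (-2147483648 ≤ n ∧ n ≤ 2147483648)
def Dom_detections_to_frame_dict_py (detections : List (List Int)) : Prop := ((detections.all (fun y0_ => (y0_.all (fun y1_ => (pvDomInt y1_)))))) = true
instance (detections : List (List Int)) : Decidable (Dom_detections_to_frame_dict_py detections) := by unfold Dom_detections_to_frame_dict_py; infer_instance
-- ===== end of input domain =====

-- B builds the dict from the distinct frame_ids (first-appearance order) with one scan per id,
-- instead of A's single accumulating dict pass; objective: alternative decomposition (not faster).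

-- ===== PORT A =====
-- single pass: frame_dict = {}; for det: if det[0] not in frame_dict: frame_dict[det[0]] = []; frame_dict[det[0]].append(det[1:])
def detections_to_frame_dict_py (detections : List (List Int)) : List (Int × List (List Int)) :=
  (detections.foldl
    (fun (frame_dict : PySem.Dict Int (List (List Int))) det =>
      let frame_id := PySem.List.pyGetD det 0 0   -- det[0]; total form, exact under Pre_ (rows nonempty)
      let frame_dict := if frame_dict.contains frame_id then frame_dict
                        else frame_dict.insert frame_id []
      frame_dict.modify frame_id [] (fun l => l ++ [PySem.List.slice det (some 1) none]))  -- .append(det[1:])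
    PySem.Dict.empty).items

-- ===== PORT B =====
-- ids = list(dict.fromkeys(det[0] for det in detections)); then {fid: [det[1:] for det if det[0]==fid] for fid in ids}
def detections_to_frame_dict_py_alt (detections : List (List Int)) : List (Int × List (List Int)) :=
  let ids := PySem.List.dedup (detections.map (fun det => PySem.List.pyGetD det 0 0))
  ids.map (fun fid =>
    (fid, (detections.filter (fun det => PySem.List.pyGetD det 0 0 == fid)).map
            (fun det => PySem.List.slice det (some 1) none)))

-- ===== PRECONDITION & SPEC =====
-- Pre_ excludes inputs containing an empty row, on which Python A raises IndexError at det[0].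
def Pre_detections_to_frame_dict_py (detections : List (List Int)) : Prop :=
  ∀ det ∈ detections, det ≠ []
instance (detections : List (List Int)) : Decidable (Pre_detections_to_frame_dict_py detections) := by
  unfold Pre_detections_to_frame_dict_py; infer_instance
def pvWitness_detections_to_frame_dict_py : List (List Int) := [[1, 2, 3], [2, 4, 5], [1, 6, 7], [3]]
def Spec_detections_to_frame_dict_py (detections : List (List Int)) (out : List (Int × List (List Int))) : Prop := out = detections_to_frame_dict_py_alt detections
instance (detections : List (List Int)) (out : List (Int × List (List Int))) : Decidable (Spec_detections_to_frame_dict_py detections out) := by unfold Spec_detections_to_frame_dict_py; infer_instance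

-- ===== CLAIM (what is proved, stated in full; the proofs are below) =====
def Claim_equal_detections_to_frame_dict_py : Prop := ∀ (detections : List (List Int)), Dom_detections_to_frame_dict_py detections → Pre_detections_to_frame_dict_py detections → Spec_detections_to_frame_dict_py detections (detections_to_frame_dict_py detections)

-- ===== LEMMAS AND PROOFS =====

-- A's loop body (setdefault-then-append) is one Dict.modify.
theorem stepA_eq (d : PySem.Dict Int (List (List Int))) (det : List Int) :
    (let frame_id := PySem.List.pyGetD det 0 0
     let d' := if d.contains frame_id then d else d.insert frame_id []
     d'.modify frame_id [] (fun l => l ++ [PySem.List.slice det (some 1) none]))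
    = d.modify (PySem.List.pyGetD det 0 0) []
        (fun l => l ++ [PySem.List.slice det (some 1) none]) := by
  set k := PySem.List.pyGetD det 0 0 with hk
  by_cases h : d.contains k = true
  · simp [h]
  · simp only [Bool.not_eq_true] at h
    simp [h, PySem.Dict.modify, PySem.Dict.getD_insert_self,
      PySem.Dict.insert_insert_self, PySem.Dict.getD_of_not_contains d [] h]

theorem detections_to_frame_dict_py_spec' (detections : List (List Int)) :
    detections_to_frame_dict_py detections = detections_to_frame_dict_py_alt detections := by
  unfold detections_to_frame_dict_py detections_to_frame_dict_py_alt
  rw [PySem.List.foldl_congr_mem _ _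
        (fun d det => d.modify (PySem.List.pyGetD det 0 0) []
          (fun l => l ++ [PySem.List.slice det (some 1) none])) _
        (fun acc x _ => stepA_eq acc x)]
  set D := detections.foldl
      (fun (d : PySem.Dict Int (List (List Int))) det =>
        d.modify (PySem.List.pyGetD det 0 0) []
          (fun l => l ++ [PySem.List.slice det (some 1) none]))
      PySem.Dict.empty with hD
  have hkeys : D.keys = PySem.Set.ofList (detections.map (fun det => PySem.List.pyGetD det 0 0)) := by
    rw [hD, PySem.Dict.keys_foldl_modify_key detections (fun det => PySem.List.pyGetD det 0 0)
      [] (fun _ det => fun l => l ++ [PySem.List.slice det (some 1) none]),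
      PySem.Dict.keys_empty, PySem.Set.update_nil_left]
  have hnd : D.keys.Nodup := by
    rw [hkeys]; exact PySem.Set.nodup_ofList _
  have hgetD : ∀ c : Int, D.getD c []
      = (detections.filter (fun det => PySem.List.pyGetD det 0 0 == c)).map
          (fun det => PySem.List.slice det (some 1) none) := by
    intro c
    have hmap : D = (detections.map
        (fun det => (PySem.List.pyGetD det 0 0, PySem.List.slice det (some 1) none))).foldl
        (fun (d : PySem.Dict Int (List (List Int))) p => d.modify p.1 [] (fun l => l ++ [p.2]))
        PySem.Dict.empty := by
      rw [hD, List.foldl_map]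
    rw [hmap, PySem.Dict.getD_foldl_modify_append, PySem.Dict.getD_empty]
    simp [List.filter_map, List.map_map, Function.comp_def]
  rw [PySem.Dict.items_eq_map_keys D hnd [], hkeys]
  simp only [PySem.List.dedup_eq_ofList]
  exact List.map_congr_left (fun fid _ => by rw [hgetD fid])

-- ===== VERDICT (by name: the statement is the Claim_ definition above) =====
theorem detections_to_frame_dict_py_spec : Claim_equal_detections_to_frame_dict_py := by
  intro detections _ _
  unfold Spec_detections_to_frame_dict_py
  exact detections_to_frame_dict_py_spec' detections
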